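-- pv_equiv track=rewrite | github.com/Davtax/Long_range_QQD | resources.py | letters_2_binary
-- ===== SOURCE A (Python) =====
-- def letters_2_binary(state: str) -> str:
--     """
--     Convert a state in letters to a binary representation. The letters are 'u', 'd', and 's' for up, down, and singlet.
--     For example, 'uds' is converted to '101|011'.
--
--     Parameters
--     ----------
--     state: str
--         State in letters.
--
--     Returns
--     -------
--     str
--         State in binary representation.
--     """
--     n = len(state)
--     ups = ['0'] * n
--     downs = ['0'] * n
--
--     for site, particle in enumerate(state):
--         if particle == 'u':
--             ups[site] = '1'
--         elif particle == 'd':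
--             downs[site] = '1'
--         elif particle == 's':
--             ups[site] = '1'
--             downs[site] = '1'
--     return ''.join(ups) + '|' + ''.join(downs)
-- ===== SOURCE B (Python) =====
-- def letters_2_binary(state: str) -> str:
--     ups = ''.join('1' if c in 'us' else '0' for c in state)
--     downs = ''.join('1' if c in 'ds' else '0' for c in state)
--     return ups + '|' + downs
-- ===== Notes on version B (the rewrite author's own statement) =====
-- stated objective: simpler
-- what changed: Replaces the index-mutating single pass over two parallel zero-initialized arrays with two independent membership-classification passes, each building its half of the string directly.
import Mathlib
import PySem

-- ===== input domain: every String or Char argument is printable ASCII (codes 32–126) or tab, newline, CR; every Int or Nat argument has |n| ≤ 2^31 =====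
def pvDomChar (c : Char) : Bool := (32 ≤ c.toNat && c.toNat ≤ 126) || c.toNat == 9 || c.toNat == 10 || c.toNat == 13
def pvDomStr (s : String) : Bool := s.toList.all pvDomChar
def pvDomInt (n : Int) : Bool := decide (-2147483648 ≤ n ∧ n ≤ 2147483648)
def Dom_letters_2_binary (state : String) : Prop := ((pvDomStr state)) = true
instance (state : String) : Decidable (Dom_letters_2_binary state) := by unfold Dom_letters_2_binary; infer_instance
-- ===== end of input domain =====

-- B builds the two halves by two independent membership-classification passes instead of A's
-- single index-mutating pass over two parallel '0'-filled arrays; objective: simpler.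

-- ===== PORT A =====
-- enumerate(state) starting at index k
def pvEnumFrom (k : Nat) : List Char → List (Nat × Char)
  | [] => []
  | c :: cs => (k, c) :: pvEnumFrom (k + 1) cs

-- the for-loop of A: positional assignment into the two arrays
def pvLoopA : List (Nat × Char) → List Char → List Char → (List Char × List Char)
  | [], ups, downs => (ups, downs)
  | (site, particle) :: rest, ups, downs =>
    if particle = 'u' then pvLoopA rest (ups.set site '1') downs
    else if particle = 'd' then pvLoopA rest ups (downs.set site '1')
    else if particle = 's' then pvLoopA rest (ups.set site '1') (downs.set site '1')
    else pvLoopA rest ups downs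

def letters_2_binary (state : String) : String :=
  let n := state.toList.length
  let p := pvLoopA (pvEnumFrom 0 state.toList) (List.replicate n '0') (List.replicate n '0')
  String.mk p.1 ++ "|" ++ String.mk p.2

-- ===== PORT B =====
def pvUpBit (c : Char) : Char := if c = 'u' ∨ c = 's' then '1' else '0'
def pvDownBit (c : Char) : Char := if c = 'd' ∨ c = 's' then '1' else '0'

def letters_2_binary_alt (state : String) : String :=
  String.mk (state.toList.map pvUpBit) ++ "|" ++ String.mk (state.toList.map pvDownBit)

-- ===== PRECONDITION & SPEC =====
def Spec_letters_2_binary (state : String) (out : String) : Prop := out = letters_2_binary_alt state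
instance (state : String) (out : String) : Decidable (Spec_letters_2_binary state out) := by unfold Spec_letters_2_binary; infer_instance

-- ===== CLAIM (what is proved, stated in full; the proofs are below) =====
def Claim_equal_letters_2_binary : Prop := ∀ (state : String), Dom_letters_2_binary state → Spec_letters_2_binary state (letters_2_binary state)

-- ===== LEMMAS AND PROOFS =====

lemma pvSet_prefix (pre : List Char) (x : Char) (rest : List Char) (y : Char) :
    (pre ++ x :: rest).set pre.length y = pre ++ y :: rest := by
  induction pre with
  | nil => rfl
  | cons a t ih => simp [List.set, ih]

lemma pvLoopA_eq (l : List Char) (pre1 pre2 : List Char) (h : pre2.length = pre1.length) :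
    pvLoopA (pvEnumFrom pre1.length l) (pre1 ++ List.replicate l.length '0')
      (pre2 ++ List.replicate l.length '0')
      = (pre1 ++ l.map pvUpBit, pre2 ++ l.map pvDownBit) := by
  induction l generalizing pre1 pre2 with
  | nil => simp [pvEnumFrom, pvLoopA]
  | cons c cs ih =>
    simp only [pvEnumFrom, pvLoopA, List.length_cons, List.replicate_succ, List.map_cons]
    by_cases hu : c = 'u'
    · have := ih (pre1 ++ ['1']) (pre2 ++ ['0']) (by simp [h])
      simp only [hu, if_pos rfl, pvSet_prefix]
      rw [← h, pvSet_prefix]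
      simpa [List.append_assoc, List.length_append, pvUpBit, pvDownBit, h] using this
    · by_cases hd : c = 'd'
      · have := ih (pre1 ++ ['0']) (pre2 ++ ['1']) (by simp [h])
        simp only [hd, if_neg (by decide : ¬ ('d' = 'u')), if_pos rfl]
        rw [← h, pvSet_prefix]
        simpa [List.append_assoc, List.length_append, pvUpBit, pvDownBit, h] using this
      · by_cases hs : c = 's'
        · have := ih (pre1 ++ ['1']) (pre2 ++ ['1']) (by simp [h])
          simp only [hs, if_neg (by decide : ¬ ('s' = 'u')), if_neg (by decide : ¬ ('s' = 'd')), if_pos rfl, pvSet_prefix]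
          rw [← h, pvSet_prefix]
          simpa [List.append_assoc, List.length_append, pvUpBit, pvDownBit, h] using this
        · have := ih (pre1 ++ ['0']) (pre2 ++ ['0']) (by simp [h])
          simp only [if_neg hu, if_neg hd, if_neg hs]
          simpa [List.append_assoc, List.length_append, pvUpBit, pvDownBit, hu, hd, hs, h] using this

-- ===== VERDICT (by name: the statement is the Claim_ definition above) =====
theorem letters_2_binary_spec : Claim_equal_letters_2_binary := by
  intro state _
  unfold Spec_letters_2_binary letters_2_binary letters_2_binary_alt
  have := pvLoopA_eq state.toList [] [] rfl
  simp only [List.length_nil, List.nil_append, String.length_toList] at this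
  simp [this]
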